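-- pv_equiv track=rewrite | github.com/jipengda/DynamicProgramming | Lowe's.py | fellow_label
-- ===== SOURCE A (Python) =====
-- def fellow_label(sets, new_one):
--     new_one = sets[-1]
--     new_one_time = new_one[0]
--     new_one_cost = new_one[1]
--     length=len(sets)
--     delete_flag=0
--     # Here, every set has format like [node x1, node x2, node x3, node x4, node x5, [time, cost]]
--     # time compare
--     for i in range(length-1):
--         compare=sets[i]
--         compare_time=compare[0]
--         compare_cost=compare[1]
--         if (new_one_time == compare_time):
--             if(new_one_cost > compare_cost):
--                 delete_flag=1
--                 return delete_flag
--
--     # if time is equal, compare the cost, if it has more cost, delete flag = 1, default delete flag=0, means does not delete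
--
--     # cost compare
--     for i in range(length-1):
--         compare=sets[i]
--         compare_time=compare[0]
--         compare_cost=compare[1]
--         if (new_one_cost == compare_cost):
--             if(new_one_time > compare_time):
--                 delete_flag=1
--                 return delete_flag
--     return delete_flag
-- ===== SOURCE B (Python) =====
-- def fellow_label(sets, new_one):
--     new_one = sets[-1]
--     t = new_one[0]
--     c = new_one[1]
--     return 1 if any((t == compare[0] and c > compare[1]) or
--                     (c == compare[1] and t > compare[0])
--                     for compare in sets[:-1]) else 0
-- ===== Notes on version B (the rewrite author's own statement) =====
-- stated objective: simpler
-- what changed: A's two separate index-driven full scans (one for the time-equal test, one for the cost-equal test) are fused into a single any() pass over sets[:-1] with the combined predicate; this is sound because both of A's branches return the same value 1.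
-- outside the precondition, e.g. on fellow_label([[1, 1], [1], [1, 3]], []): A returns 1, B returns 1
import Mathlib
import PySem

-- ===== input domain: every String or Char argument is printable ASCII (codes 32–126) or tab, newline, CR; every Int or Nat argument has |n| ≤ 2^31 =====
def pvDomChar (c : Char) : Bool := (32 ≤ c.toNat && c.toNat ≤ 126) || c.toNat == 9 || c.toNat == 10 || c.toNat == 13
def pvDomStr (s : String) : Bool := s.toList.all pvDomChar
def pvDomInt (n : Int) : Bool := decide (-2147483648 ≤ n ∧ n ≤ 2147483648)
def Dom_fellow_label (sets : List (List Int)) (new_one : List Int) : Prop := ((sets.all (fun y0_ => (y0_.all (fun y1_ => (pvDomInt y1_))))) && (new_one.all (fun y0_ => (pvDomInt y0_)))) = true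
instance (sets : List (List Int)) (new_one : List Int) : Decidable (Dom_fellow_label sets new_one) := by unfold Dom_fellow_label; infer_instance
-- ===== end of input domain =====

-- B fuses A's two separate scans of sets[:-1] into one any() pass (simpler,
-- same result because both of A's branches return 1).  A overwrites the
-- parameter new_one, so new_one never influences the result.

-- ===== PORT A =====
-- first loop: 'for i in range(length-1): … if new_one_time == compare_time and new_one_cost > compare_cost: return 1'
def fl_loopTime (sets : List (List Int)) (t c : Int) : List Int → Option Int
  | [] => none
  | i :: rest =>
    let compare := PySem.List.pyGetD sets i []
    let compare_time := PySem.List.pyGetD compare 0 0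
    let compare_cost := PySem.List.pyGetD compare 1 0
    if t == compare_time then
      (if c > compare_cost then some 1 else fl_loopTime sets t c rest)
    else fl_loopTime sets t c rest

-- second loop: 'if new_one_cost == compare_cost and new_one_time > compare_time: return 1'
def fl_loopCost (sets : List (List Int)) (t c : Int) : List Int → Option Int
  | [] => none
  | i :: rest =>
    let compare := PySem.List.pyGetD sets i []
    let compare_time := PySem.List.pyGetD compare 0 0
    let compare_cost := PySem.List.pyGetD compare 1 0
    if c == compare_cost then
      (if t > compare_time then some 1 else fl_loopCost sets t c rest)
    else fl_loopCost sets t c rest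

def fellow_label (sets : List (List Int)) (new_one : List Int) : Int :=
  let new_one := PySem.List.pyGetD sets (-1) []   -- sets[-1]; Pre_ excludes sets = []
  let new_one_time := PySem.List.pyGetD new_one 0 0
  let new_one_cost := PySem.List.pyGetD new_one 1 0
  let length : Int := sets.length
  match fl_loopTime sets new_one_time new_one_cost (PySem.List.pyRange 0 (length - 1) 1) with
  | some v => v
  | none =>
    match fl_loopCost sets new_one_time new_one_cost (PySem.List.pyRange 0 (length - 1) 1) with
    | some v => v
    | none => 0

-- ===== PORT B =====
def fellow_label_alt (sets : List (List Int)) (new_one : List Int) : Int :=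
  let new_one := PySem.List.pyGetD sets (-1) []
  let t := PySem.List.pyGetD new_one 0 0
  let c := PySem.List.pyGetD new_one 1 0
  if (PySem.List.slice sets none (some (-1))).any (fun compare =>
        (t == PySem.List.pyGetD compare 0 0 && c > PySem.List.pyGetD compare 1 0) ||
        (c == PySem.List.pyGetD compare 1 0 && t > PySem.List.pyGetD compare 0 0))
  then 1 else 0

-- ===== PRECONDITION & SPEC =====
-- Pre_ excludes the inputs on which A raises IndexError (empty sets, or a row with
-- fewer than 2 entries); it also excludes inputs where an earlier match lets A
-- return 1 before ever reaching a too-short later row — A's returning there is an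
-- accident of its scan order.
def Pre_fellow_label (sets : List (List Int)) (new_one : List Int) : Prop :=
  sets ≠ [] ∧ ∀ row ∈ sets, 2 ≤ row.length
instance (sets : List (List Int)) (new_one : List Int) : Decidable (Pre_fellow_label sets new_one) := by unfold Pre_fellow_label; infer_instance
def pvWitness_fellow_label : List (List Int) × List Int := ([[1, 1], [2, 3], [1, 3]], [])

def Spec_fellow_label (sets : List (List Int)) (new_one : List Int) (out : Int) : Prop := out = fellow_label_alt sets new_one
instance (sets : List (List Int)) (new_one : List Int) (out : Int) : Decidable (Spec_fellow_label sets new_one out) := by unfold Spec_fellow_label; infer_instance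

-- ===== CLAIM (what is proved, stated in full; the proofs are below) =====
def Claim_equal_fellow_label : Prop := ∀ (sets : List (List Int)) (new_one : List Int), Dom_fellow_label sets new_one → Pre_fellow_label sets new_one → Spec_fellow_label sets new_one (fellow_label sets new_one)

-- ===== LEMMAS AND PROOFS =====

-- the loop over indices returns some 1 exactly when some index satisfies its test
theorem fl_loopTime_eq (sets : List (List Int)) (t c : Int) (idxs : List Int) :
    fl_loopTime sets t c idxs =
      (if idxs.any (fun i =>
          (t == PySem.List.pyGetD (PySem.List.pyGetD sets i []) 0 0 &&
           c > PySem.List.pyGetD (PySem.List.pyGetD sets i []) 1 0))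
       then some 1 else none) := by
  induction idxs with
  | nil => rfl
  | cons i rest ih =>
    simp only [fl_loopTime, List.any_cons, ih]
    by_cases h1 : (t == PySem.List.pyGetD (PySem.List.pyGetD sets i []) 0 0) = true <;>
      by_cases h2 : (c > PySem.List.pyGetD (PySem.List.pyGetD sets i []) 1 0) <;>
      simp [h1, h2]

theorem fl_loopCost_eq (sets : List (List Int)) (t c : Int) (idxs : List Int) :
    fl_loopCost sets t c idxs =
      (if idxs.any (fun i =>
          (c == PySem.List.pyGetD (PySem.List.pyGetD sets i []) 1 0 &&
           t > PySem.List.pyGetD (PySem.List.pyGetD sets i []) 0 0))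
       then some 1 else none) := by
  induction idxs with
  | nil => rfl
  | cons i rest ih =>
    simp only [fl_loopCost, List.any_cons, ih]
    by_cases h1 : (c == PySem.List.pyGetD (PySem.List.pyGetD sets i []) 1 0) = true <;>
      by_cases h2 : (t > PySem.List.pyGetD (PySem.List.pyGetD sets i []) 0 0) <;>
      simp [h1, h2]

-- any over range(len-1) of an element-predicate = any over dropLast
theorem any_pyRange_dropLast (sets : List (List Int)) (p : List Int → Bool) :
    (PySem.List.pyRange 0 ((sets.length : Int) - 1) 1).any
        (fun i => p (PySem.List.pyGetD sets i [])) = sets.dropLast.any p := by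
  rcases eq_or_ne sets [] with rfl | hne
  · rfl
  · rw [Bool.eq_iff_iff]
    simp only [List.any_eq_true]
    constructor
    · rintro ⟨i, hi, hp⟩
      rw [PySem.List.mem_pyRange_one] at hi
      have hi0 : 0 ≤ i := hi.1
      have hilt : i < (sets.length : Int) - 1 := hi.2
      have hlt : i.toNat < sets.dropLast.length := by
        rw [List.length_dropLast]; omega
      refine ⟨sets.dropLast[i.toNat], List.getElem_mem _, ?_⟩
      have : PySem.List.pyGetD sets i [] = sets[i.toNat] := by
        exact PySem.List.pyGetD_eq_getElem sets [] hi0 (by push_cast; omega)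
      rw [this] at hp
      rwa [List.getElem_dropLast]
    · rintro ⟨x, hx, hp⟩
      obtain ⟨j, hj, rfl⟩ := List.getElem_of_mem hx
      have hj' : j < sets.length - 1 := by
        rw [List.length_dropLast] at hj; omega
      refine ⟨(j : Int), ?_, ?_⟩
      · rw [PySem.List.mem_pyRange_one]; exact ⟨by positivity, by push_cast; omega⟩
      · have : PySem.List.pyGetD sets (j : Int) [] = sets[j] := by
          exact PySem.List.pyGetD_eq_getElem sets [] (by positivity) (by push_cast; omega)
        rw [this, ← List.getElem_dropLast hj]
        exact hp

-- any of a disjunction splits into a disjunction of anys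
theorem any_or_split {α : Type} (l : List α) (p q : α → Bool) :
    l.any (fun x => p x || q x) = (l.any p || l.any q) := by
  induction l with
  | nil => rfl
  | cons x xs ih =>
    simp only [List.any_cons, ih]
    cases p x <;> cases q x <;> simp

-- ===== VERDICT (by name: the statement is the Claim_ definition above) =====
theorem fellow_label_spec : Claim_equal_fellow_label := by
  intro sets new_one _ hpre
  obtain ⟨hne, _⟩ := hpre
  unfold Spec_fellow_label fellow_label fellow_label_alt
  simp only [fl_loopTime_eq, fl_loopCost_eq, PySem.List.slice_to_neg_one]
  generalize PySem.List.pyGetD (PySem.List.pyGetD sets (-1) []) 0 0 = t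
  generalize PySem.List.pyGetD (PySem.List.pyGetD sets (-1) []) 1 0 = c
  rw [any_pyRange_dropLast sets (fun compare =>
        t == PySem.List.pyGetD compare 0 0 && decide (c > PySem.List.pyGetD compare 1 0)),
      any_pyRange_dropLast sets (fun compare =>
        c == PySem.List.pyGetD compare 1 0 && decide (t > PySem.List.pyGetD compare 0 0)),
      any_or_split]
  cases hA : sets.dropLast.any (fun compare =>
      t == PySem.List.pyGetD compare 0 0 && decide (c > PySem.List.pyGetD compare 1 0)) <;>
    cases hB : sets.dropLast.any (fun compare =>
      c == PySem.List.pyGetD compare 1 0 && decide (t > PySem.List.pyGetD compare 0 0)) <;>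
    simp
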